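-- pv_equiv track=rewrite | github.com/sajal1123/world-cup-chatbot | src/project_p4.py | summarize_analysis
-- ===== SOURCE A (Python) =====
-- def summarize_analysis(num_words, wps, num_pronouns, num_prp, num_articles, num_past, num_future, num_prep, num_negations):
--     informative_correlates = []
--
--     # Creating a reference dictionary with keys = linguistic features, and values = psychological correlates.
--     # informative_correlates should hold a subset of three values from this dictionary.
--     # DO NOT change these values for autograder to work correctly
--     psychological_correlates = {}
--     psychological_correlates["num_words"] = "Talkativeness, verbal fluency"
--     psychological_correlates["wps"] = "Verbal fluency, cognitive complexity"
--     psychological_correlates["num_pronouns"] = "Informal, personal"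
--     psychological_correlates["num_prp"] = "Personal, social"
--     psychological_correlates["num_articles"] = "Use of concrete nouns, interest in objects/things"
--     psychological_correlates["num_past"] = "Focused on the past"
--     psychological_correlates["num_future"] = "Future and goal-oriented"
--     psychological_correlates["num_prep"] = "Education, concern with precision"
--     psychological_correlates["num_negations"] = "Inhibition"
--
--     # Set thresholds
--     num_words_threshold = 100
--     wps_threshold = 20
--
--     # [YOUR CODE HERE]
--     if num_words > num_words_threshold:
--         informative_correlates.append(psychological_correlates["num_words"])
--     if wps > wps_threshold:
--         informative_correlates.append(psychological_correlates["wps"])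
--     d = dict()
--     d['num_pronouns'] = num_pronouns
--     d['num_prp'] = num_prp
--     d['num_articles'] = num_articles
--     d['num_past'] = num_past
--     d['num_future'] = num_future
--     d['num_prep'] = num_prep
--     d['num_negations'] = num_negations
--     ds = dict(sorted(d.items(), key = lambda x : x[1], reverse=True))
--     ctr = 0
--     for k, v in ds.items():
--         if len(informative_correlates)<3:
--             informative_correlates.append(psychological_correlates[k])
--         else:
--             break
--     return informative_correlates
-- ===== SOURCE B (Python) =====
-- def _drop_first_with_value(pool, v):
--     # return pool with the first entry whose value equals v removed
--     for i, e in enumerate(pool):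
--         if e[1] == v:
--             return pool[:i] + pool[i + 1:]
--     return pool
--
--
-- def _top_correlates(pool, n, psychological_correlates):
--     # recursively pick the first entry with maximal value, n times
--     if n <= 0 or not pool:
--         return []
--     best = pool[0]
--     for e in pool[1:]:
--         if e[1] > best[1]:
--             best = e
--     return [psychological_correlates[best[0]]] + _top_correlates(
--         _drop_first_with_value(pool, best[1]), n - 1, psychological_correlates)
--
--
-- def summarize_analysis(num_words, wps, num_pronouns, num_prp, num_articles, num_past, num_future, num_prep, num_negations):
--     psychological_correlates = {
--         "num_words": "Talkativeness, verbal fluency",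
--         "wps": "Verbal fluency, cognitive complexity",
--         "num_pronouns": "Informal, personal",
--         "num_prp": "Personal, social",
--         "num_articles": "Use of concrete nouns, interest in objects/things",
--         "num_past": "Focused on the past",
--         "num_future": "Future and goal-oriented",
--         "num_prep": "Education, concern with precision",
--         "num_negations": "Inhibition",
--     }
--
--     informative_correlates = []
--     if num_words > 100:
--         informative_correlates.append(psychological_correlates["num_words"])
--     if wps > 20:
--         informative_correlates.append(psychological_correlates["wps"])
--
--     pool = [
--         ("num_pronouns", num_pronouns),
--         ("num_prp", num_prp),
--         ("num_articles", num_articles),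
--         ("num_past", num_past),
--         ("num_future", num_future),
--         ("num_prep", num_prep),
--         ("num_negations", num_negations),
--     ]
--     return informative_correlates + _top_correlates(
--         pool, 3 - len(informative_correlates), psychological_correlates)
-- ===== Notes on version B (the rewrite author's own statement) =====
-- stated objective: alternative
-- what changed: A stable-sorts all seven feature entries in reverse and walks the sorted dict until three correlates are collected; B never sorts: it recursively performs repeated first-maximum selection, scanning the remaining pool for the first entry with the highest value, emitting its correlate and removing it, once per still-needed correlate.
import Mathlib
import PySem

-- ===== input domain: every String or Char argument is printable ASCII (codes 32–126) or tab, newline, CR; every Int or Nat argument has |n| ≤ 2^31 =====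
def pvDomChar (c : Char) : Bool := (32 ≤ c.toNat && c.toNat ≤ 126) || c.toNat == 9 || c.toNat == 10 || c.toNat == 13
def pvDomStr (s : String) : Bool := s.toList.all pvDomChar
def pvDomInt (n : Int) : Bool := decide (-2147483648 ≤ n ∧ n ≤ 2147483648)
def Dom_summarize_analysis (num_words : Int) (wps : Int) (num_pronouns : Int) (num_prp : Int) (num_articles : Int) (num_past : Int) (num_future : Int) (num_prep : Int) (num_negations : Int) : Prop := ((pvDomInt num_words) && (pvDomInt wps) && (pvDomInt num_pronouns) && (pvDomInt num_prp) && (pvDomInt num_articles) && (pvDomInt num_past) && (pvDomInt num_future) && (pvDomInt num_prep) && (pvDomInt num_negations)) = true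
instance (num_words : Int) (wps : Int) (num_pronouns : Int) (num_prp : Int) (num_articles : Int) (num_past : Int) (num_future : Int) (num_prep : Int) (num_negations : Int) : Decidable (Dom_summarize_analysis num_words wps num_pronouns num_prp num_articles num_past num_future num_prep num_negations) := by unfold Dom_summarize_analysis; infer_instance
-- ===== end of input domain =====

-- B replaces A's full stable reverse-sort of the seven features by repeated first-maximum
-- selection (pick the first entry with the highest value, remove it, recurse); objective: alternative.

-- ===== PORT A =====
-- the psychological_correlates dict, built key by key as A does
def pcDictA : PySem.Dict String String :=
  (((((((((PySem.Dict.empty.insert "num_words" "Talkativeness, verbal fluency").insert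
    "wps" "Verbal fluency, cognitive complexity").insert
    "num_pronouns" "Informal, personal").insert
    "num_prp" "Personal, social").insert
    "num_articles" "Use of concrete nouns, interest in objects/things").insert
    "num_past" "Focused on the past").insert
    "num_future" "Future and goal-oriented").insert
    "num_prep" "Education, concern with precision").insert
    "num_negations" "Inhibition")

-- the 'for k, v in ds.items(): if len(...)<3: append else: break' loop
def loopA : PySem.Dict String String → List (String × Int) → List String → List String
  | _, [], acc => acc
  | pc, (k, _) :: rest, acc =>
      if acc.length < 3 then loopA pc rest (acc ++ [pc.getD k ""]) else acc

def summarize_analysis (num_words : Int) (wps : Int) (num_pronouns : Int) (num_prp : Int) (num_articles : Int) (num_past : Int) (num_future : Int) (num_prep : Int) (num_negations : Int) : List String :=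
  let informative0 : List String := []
  let informative1 := if num_words > 100 then informative0 ++ [pcDictA.getD "num_words" ""] else informative0
  let informative2 := if wps > 20 then informative1 ++ [pcDictA.getD "wps" ""] else informative1
  let d : PySem.Dict String Int :=
    (((((((PySem.Dict.empty.insert "num_pronouns" num_pronouns).insert
      "num_prp" num_prp).insert
      "num_articles" num_articles).insert
      "num_past" num_past).insert
      "num_future" num_future).insert
      "num_prep" num_prep).insert
      "num_negations" num_negations)
  let ds := PySem.Dict.ofList (PySem.List.sorted d.items (fun x => x.2) true)
  loopA pcDictA ds.items informative2

-- ===== PORT B =====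
-- the psychological_correlates dict literal of Source B
def pcDictB : PySem.Dict String String :=
  PySem.Dict.ofList
    [("num_words", "Talkativeness, verbal fluency"),
     ("wps", "Verbal fluency, cognitive complexity"),
     ("num_pronouns", "Informal, personal"),
     ("num_prp", "Personal, social"),
     ("num_articles", "Use of concrete nouns, interest in objects/things"),
     ("num_past", "Focused on the past"),
     ("num_future", "Future and goal-oriented"),
     ("num_prep", "Education, concern with precision"),
     ("num_negations", "Inhibition")]

-- _drop_first_with_value: pool with the first value-v entry removed (exact: the Python
-- splices out pool[i] at the first i with pool[i][1] == v, which is this traversal)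
def dropFirstWithValue (v : Int) : List (String × Int) → List (String × Int)
  | [] => []
  | e :: rest => if e.2 = v then rest else e :: dropFirstWithValue v rest

-- the 'for e in pool[1:]: if e[1] > best[1]: best = e' scan
def scanBest (best : String × Int) : List (String × Int) → String × Int
  | [] => best
  | e :: rest => scanBest (if best.2 < e.2 then e else best) rest

-- _top_correlates: recursive repeated first-maximum selection
def topCorrelates : PySem.Dict String String → Nat → List (String × Int) → List String
  | _, 0, _ => []
  | _, _ + 1, [] => []
  | pc, n + 1, b :: rest =>
      let best := scanBest b rest
      pc.getD best.1 "" :: topCorrelates pc n (dropFirstWithValue best.2 (b :: rest))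

def summarize_analysis_alt (num_words : Int) (wps : Int) (num_pronouns : Int) (num_prp : Int) (num_articles : Int) (num_past : Int) (num_future : Int) (num_prep : Int) (num_negations : Int) : List String :=
  let informative0 : List String := []
  let informative1 := if num_words > 100 then informative0 ++ [pcDictB.getD "num_words" ""] else informative0
  let informative2 := if wps > 20 then informative1 ++ [pcDictB.getD "wps" ""] else informative1
  let pool : List (String × Int) :=
    [("num_pronouns", num_pronouns), ("num_prp", num_prp), ("num_articles", num_articles),
     ("num_past", num_past), ("num_future", num_future), ("num_prep", num_prep),
     ("num_negations", num_negations)]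
  informative2 ++ topCorrelates pcDictB (3 - informative2.length) pool

-- ===== PRECONDITION & SPEC =====
def Spec_summarize_analysis (num_words : Int) (wps : Int) (num_pronouns : Int) (num_prp : Int) (num_articles : Int) (num_past : Int) (num_future : Int) (num_prep : Int) (num_negations : Int) (out : List String) : Prop := out = summarize_analysis_alt num_words wps num_pronouns num_prp num_articles num_past num_future num_prep num_negations
instance (num_words : Int) (wps : Int) (num_pronouns : Int) (num_prp : Int) (num_articles : Int) (num_past : Int) (num_future : Int) (num_prep : Int) (num_negations : Int) (out : List String) : Decidable (Spec_summarize_analysis num_words wps num_pronouns num_prp num_articles num_past num_future num_prep num_negations out) := by unfold Spec_summarize_analysis; infer_instance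

-- ===== CLAIM (what is proved, stated in full; the proofs are below) =====
def Claim_equal_summarize_analysis : Prop := ∀ (num_words : Int) (wps : Int) (num_pronouns : Int) (num_prp : Int) (num_articles : Int) (num_past : Int) (num_future : Int) (num_prep : Int) (num_negations : Int), Dom_summarize_analysis num_words wps num_pronouns num_prp num_articles num_past num_future num_prep num_negations → Spec_summarize_analysis num_words wps num_pronouns num_prp num_articles num_past num_future num_prep num_negations (summarize_analysis num_words wps num_pronouns num_prp num_articles num_past num_future num_prep num_negations)

-- ===== LEMMAS AND PROOFS =====

theorem pcAB : pcDictA = pcDictB := by decide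

theorem scanBest_append (b x : String × Int) (l : List (String × Int)) :
    scanBest b (l ++ [x]) = if (scanBest b l).2 < x.2 then x else scanBest b l := by
  induction l generalizing b with
  | nil => simp [scanBest]
  | cons e rest ih => simp [scanBest, ih]

theorem scanBest_mem (b : String × Int) (l : List (String × Int)) :
    scanBest b l ∈ b :: l := by
  induction l generalizing b with
  | nil => simp [scanBest]
  | cons e rest ih =>
      have h := ih (if b.2 < e.2 then e else b)
      simp only [scanBest]
      rcases List.mem_cons.1 h with h' | h'
      · rw [h']; split_ifs <;> simp
      · simp [h']

theorem scanBest_ge (b : String × Int) (l : List (String × Int)) :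
    ∀ y ∈ b :: l, y.2 ≤ (scanBest b l).2 := by
  induction l generalizing b with
  | nil => intro y hy; simp at hy; simp [scanBest, hy]
  | cons e rest ih =>
      intro y hy
      simp only [scanBest]
      have hb' : b.2 ≤ (if b.2 < e.2 then e else b).2 ∧ e.2 ≤ (if b.2 < e.2 then e else b).2 := by
        split_ifs with hc
        · exact ⟨le_of_lt hc, le_refl _⟩
        · exact ⟨le_refl _, not_lt.1 hc⟩
      have htop := ih (if b.2 < e.2 then e else b) _ (List.mem_cons_self ..)
      rcases List.mem_cons.1 hy with rfl | h'
      · exact le_trans hb'.1 htop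
      · rcases List.mem_cons.1 h' with rfl | h''
        · exact le_trans hb'.2 htop
        · exact ih _ y (List.mem_cons_of_mem _ h'')

theorem drop_append_not_mem (v : Int) (l₁ l₂ : List (String × Int))
    (h : ∀ y ∈ l₁, y.2 ≠ v) :
    dropFirstWithValue v (l₁ ++ l₂) = l₁ ++ dropFirstWithValue v l₂ := by
  induction l₁ with
  | nil => rfl
  | cons e rest ih =>
      have he : e.2 ≠ v := h e (List.mem_cons_self ..)
      simp only [List.cons_append, dropFirstWithValue, if_neg he]
      rw [ih (fun y hy => h y (List.mem_cons_of_mem _ hy))]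

theorem drop_append_mem (v : Int) (l₁ l₂ : List (String × Int))
    (h : ∃ y ∈ l₁, y.2 = v) :
    dropFirstWithValue v (l₁ ++ l₂) = dropFirstWithValue v l₁ ++ l₂ := by
  induction l₁ with
  | nil => simp at h
  | cons e rest ih =>
      by_cases he : e.2 = v
      · simp [dropFirstWithValue, he]
      · rcases h with ⟨y, hy, hv⟩
        rcases List.mem_cons.1 hy with h' | h'
        · exact absurd (h' ▸ hv) he
        · simp only [List.cons_append, dropFirstWithValue, if_neg he]
          rw [ih ⟨y, h', hv⟩]

theorem sorted_snoc (l : List (String × Int)) (x : String × Int) :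
    PySem.List.sorted (l ++ [x]) (fun p => p.2) true =
      PySem.List.insertBy (fun a b => decide (b.2 < a.2)) x
        (PySem.List.sorted l (fun p => p.2) true) := by
  rw [PySem.List.sorted_rev_eq_foldl_insertBy, PySem.List.sorted_rev_eq_foldl_insertBy,
    List.foldl_append]
  rfl

-- selection characterisation of the stable reverse sort: its head is the first
-- entry with maximal value, its tail is the sort of the pool without that entry
theorem sorted_sel (b : String × Int) (l : List (String × Int)) :
    PySem.List.sorted (b :: l) (fun p => p.2) true =
      scanBest b l ::
        PySem.List.sorted (dropFirstWithValue (scanBest b l).2 (b :: l)) (fun p => p.2) true := by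
  induction l using List.reverseRecOn with
  | nil =>
      simp [PySem.List.sorted, PySem.List.insertBy, scanBest, dropFirstWithValue]
  | append_singleton ys x ih =>
      have hsnoc : (b :: (ys ++ [x])) = (b :: ys) ++ [x] := rfl
      rw [hsnoc, sorted_snoc, scanBest_append]
      by_cases h : (scanBest b ys).2 < x.2
      · rw [if_pos h]
        have hne : ∀ y ∈ b :: ys, y.2 ≠ x.2 := fun y hy =>
          ne_of_lt (lt_of_le_of_lt (scanBest_ge b ys y hy) h)
        have h1 : dropFirstWithValue x.2 ((b :: ys) ++ [x]) = b :: ys := by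
          rw [drop_append_not_mem _ _ _ hne]
          simp [dropFirstWithValue]
        rw [h1, ih]
        simp [PySem.List.insertBy, h]
      · rw [if_neg h]
        rw [drop_append_mem _ _ _ ⟨scanBest b ys, scanBest_mem b ys, rfl⟩]
        rw [sorted_snoc, ih]
        simp [PySem.List.insertBy, h]

theorem top_eq (pc : PySem.Dict String String) (n : Nat) (l : List (String × Int)) :
    topCorrelates pc n l =
      ((PySem.List.sorted l (fun p => p.2) true).take n).map (fun p => pc.getD p.1 "") := by
  induction n generalizing l with
  | zero => simp [topCorrelates]
  | succ n ih =>
      cases l with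
      | nil => simp [topCorrelates]; rfl
      | cons b rest =>
          rw [sorted_sel]
          simp only [topCorrelates, List.take_succ_cons, List.map_cons]
          rw [ih]

theorem loopA_eq (pc : PySem.Dict String String) (l : List (String × Int)) :
    ∀ acc, loopA pc l acc = acc ++ (l.take (3 - acc.length)).map (fun p => pc.getD p.1 "") := by
  induction l with
  | nil => intro acc; simp [loopA]
  | cons e rest ih =>
      intro acc
      obtain ⟨k, v⟩ := e
      by_cases h : acc.length < 3
      · have h3 : 3 - acc.length = (3 - (acc.length + 1)) + 1 := by omega
        simp only [loopA, if_pos h]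
        rw [ih, h3, List.take_succ_cons, List.map_cons]
        simp
      · have h3 : 3 - acc.length = 0 := by omega
        simp only [loopA, if_neg h]
        rw [h3]
        simp

theorem ofList_items (s : List (String × Int)) (h : (s.map Prod.fst).Nodup) :
    (PySem.Dict.ofList s).items = s := by
  show (List.foldl (fun acc p => acc.insert p.1 p.2) PySem.Dict.empty s).items = s
  have := PySem.Dict.items_foldl_insert_fresh s Prod.fst Prod.snd PySem.Dict.empty
    (by intro a _; simp [pysem]) h
  simpa using this

theorem summarize_analysis_eq (num_words wps num_pronouns num_prp num_articles num_past num_future num_prep num_negations : Int) :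
    summarize_analysis num_words wps num_pronouns num_prp num_articles num_past num_future num_prep num_negations =
    summarize_analysis_alt num_words wps num_pronouns num_prp num_articles num_past num_future num_prep num_negations := by
  have hitems :
      (PySem.Dict.empty.insert "num_pronouns" num_pronouns |>.insert "num_prp" num_prp
        |>.insert "num_articles" num_articles |>.insert "num_past" num_past
        |>.insert "num_future" num_future |>.insert "num_prep" num_prep
        |>.insert "num_negations" num_negations).items =
      [("num_pronouns", num_pronouns), ("num_prp", num_prp), ("num_articles", num_articles),
       ("num_past", num_past), ("num_future", num_future), ("num_prep", num_prep),
       ("num_negations", num_negations)] := rfl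
  have hnodup :
      ((PySem.List.sorted
          [("num_pronouns", num_pronouns), ("num_prp", num_prp), ("num_articles", num_articles),
           ("num_past", num_past), ("num_future", num_future), ("num_prep", num_prep),
           ("num_negations", num_negations)] (fun p : String × Int => p.2) true).map Prod.fst).Nodup := by
    refine ((PySem.List.sorted_perm _ (fun p : String × Int => p.2) true).map Prod.fst).nodup_iff.2 ?_
    have h7 : (["num_pronouns", "num_prp", "num_articles", "num_past", "num_future",
        "num_prep", "num_negations"] : List String).Nodup := by decide
    exact h7
  unfold summarize_analysis summarize_analysis_alt
  simp only [pcAB, hitems]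
  rw [ofList_items _ hnodup, loopA_eq, top_eq]

-- ===== VERDICT (by name: the statement is the Claim_ definition above) =====
theorem summarize_analysis_spec : Claim_equal_summarize_analysis := by
  intro num_words wps num_pronouns num_prp num_articles num_past num_future num_prep num_negations _
  unfold Spec_summarize_analysis
  exact summarize_analysis_eq num_words wps num_pronouns num_prp num_articles num_past num_future num_prep num_negations
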